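-- pv_equiv track=rewrite | github.com/kyabelode/DSL | DSLA2.py | find_highest_and_lowest
-- ===== SOURCE A (Python) =====
-- def find_highest_and_lowest(marks):
--     valid_marks = []
--     for mark in marks:
--         if mark != -1:  # Exclude absentees (-1)
--             valid_marks.append(mark)
--     if valid_marks:
--         return max(valid_marks), min(valid_marks)
--     return None, None  # If all students are absent
-- ===== SOURCE B (Python) =====
-- def find_highest_and_lowest(marks):
--     high = None
--     low = None
--     for mark in marks:
--         if mark == -1:
--             continue
--         if high is None:
--             high = mark
--             low = mark
--         else:
--             if mark > high:
--                 high = mark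
--             if mark < low:
--                 low = mark
--     return high, low
-- ===== Notes on version B (the rewrite author's own statement) =====
-- stated objective: faster
-- what changed: Replaces the build-a-filtered-list-then-max-then-min three-pass structure with one traversal that keeps two running extremes (high/low) and allocates no intermediate list.
import Mathlib
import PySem

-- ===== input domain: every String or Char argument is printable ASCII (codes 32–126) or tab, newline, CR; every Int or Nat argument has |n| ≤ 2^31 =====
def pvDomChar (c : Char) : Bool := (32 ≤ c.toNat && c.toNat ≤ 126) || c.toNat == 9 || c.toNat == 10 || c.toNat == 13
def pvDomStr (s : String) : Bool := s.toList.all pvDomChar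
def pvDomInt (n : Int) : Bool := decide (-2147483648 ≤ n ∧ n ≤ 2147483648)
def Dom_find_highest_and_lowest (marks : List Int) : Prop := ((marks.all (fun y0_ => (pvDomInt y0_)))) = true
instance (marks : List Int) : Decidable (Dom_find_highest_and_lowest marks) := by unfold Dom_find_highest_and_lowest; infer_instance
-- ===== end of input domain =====

-- B replaces A's filter-then-max-then-min three passes with one pass keeping two running extremes (no intermediate list).

-- ===== PORT A =====
def find_highest_and_lowest (marks : List Int) : Option Int × Option Int :=
  let valid_marks := marks.foldl (fun acc mark => if mark ≠ -1 then acc ++ [mark] else acc) []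
  if valid_marks ≠ [] then
    (PySem.List.max? valid_marks (fun x => x), PySem.List.min? valid_marks (fun x => x))
  else
    (none, none)

-- ===== PORT B =====
def fhl_step (st : Option Int × Option Int) (mark : Int) : Option Int × Option Int :=
  if mark = -1 then st
  else
    match st with
    | (none, _) => (some mark, some mark)
    | (some _, none) => (some mark, some mark)
    | (some h, some l) =>
        ((if h < mark then some mark else some h),
         (if mark < l then some mark else some l))

def find_highest_and_lowest_alt (marks : List Int) : Option Int × Option Int :=
  marks.foldl fhl_step (none, none)

-- ===== PRECONDITION & SPEC =====
def Spec_find_highest_and_lowest (marks : List Int) (out : Option Int × Option Int) : Prop := out = find_highest_and_lowest_alt marks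
instance (marks : List Int) (out : Option Int × Option Int) : Decidable (Spec_find_highest_and_lowest marks out) := by unfold Spec_find_highest_and_lowest; infer_instance

-- ===== CLAIM (what is proved, stated in full; the proofs are below) =====
def Claim_equal_find_highest_and_lowest : Prop := ∀ (marks : List Int), Dom_find_highest_and_lowest marks → Spec_find_highest_and_lowest marks (find_highest_and_lowest marks)

-- ===== LEMMAS AND PROOFS =====

theorem fhl_if_max (h m : Int) : (if h < m then some m else some h) = some (max h m) := by
  rw [max_def]; split_ifs <;> simp <;> omega

theorem fhl_if_min (l m : Int) : (if m < l then some m else some l) = some (min l m) := by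
  rw [min_def]; split_ifs <;> simp <;> omega

theorem fhl_valid_eq_filter (marks : List Int) (acc : List Int) :
    marks.foldl (fun acc mark => if mark ≠ -1 then acc ++ [mark] else acc) acc
      = acc ++ marks.filter (fun m => m ≠ -1) := by
  induction marks generalizing acc with
  | nil => simp
  | cons m t ih =>
    simp only [List.foldl_cons, List.filter_cons, ne_eq, ite_not, decide_not] at ih ⊢
    by_cases hm : m = -1
    · simp [hm, ih]
    · simp [hm, ih]

theorem fhl_fold_some (t : List Int) (h l : Int) :
    t.foldl fhl_step (some h, some l)
      = (some ((t.filter (fun m => m ≠ -1)).foldl max h),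
         some ((t.filter (fun m => m ≠ -1)).foldl min l)) := by
  induction t generalizing h l with
  | nil => simp
  | cons m t ih =>
    rw [List.foldl_cons, List.filter_cons]
    by_cases hm : m = -1
    · simp [fhl_step, hm, ih]
    · simp only [fhl_step, if_neg hm]
      rw [fhl_if_max, fhl_if_min, ih]
      simp [hm]

theorem fhl_fold_none (marks : List Int) :
    marks.foldl fhl_step (none, none)
      = match marks.filter (fun m => m ≠ -1) with
        | [] => (none, none)
        | x :: t => (some (t.foldl max x), some (t.foldl min x)) := by
  induction marks with
  | nil => simp
  | cons m t ih =>
    rw [List.foldl_cons, List.filter_cons]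
    by_cases hm : m = -1
    · simp [fhl_step, hm, ih]
    · simp only [fhl_step, if_neg hm]
      rw [fhl_fold_some]
      simp [hm]

-- ===== VERDICT (by name: the statement is the Claim_ definition above) =====
theorem find_highest_and_lowest_spec : Claim_equal_find_highest_and_lowest := by
  intro marks _
  unfold Spec_find_highest_and_lowest find_highest_and_lowest find_highest_and_lowest_alt
  rw [fhl_valid_eq_filter, fhl_fold_none]
  simp only [List.nil_append]
  cases h : marks.filter (fun m => m ≠ -1) with
  | nil => simp
  | cons x t =>
    simp only [ne_eq, reduceCtorEq, not_false_eq_true, if_true]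
    rw [PySem.List.max?_id_cons, PySem.List.min?_id_cons]
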